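-- pv_equiv track=rewrite | github.com/pypi-data/pypi-mirror-280 | packages/tla/tla-0.0.2.tar.gz/tla-0.0.2/tla/_pprint.py | _glue_prefix_box
-- ===== SOURCE A (Python) =====
-- def _glue_prefix_box(
--         prefix:
--             str,
--         box:
--             str,
--         indent_width:
--             int |
--             None=None
--         ) -> str:
--     """Concatenate strings with proper indentation."""
--     lines = box.split('\n')
--     if indent_width is None:
--         prefix_lines = prefix.split('\n')
--         indent_width = len(prefix_lines[-1])
--     indent = indent_width * '\x20'
--     res_lines = [prefix + lines[0]]
--     res_lines.extend(
--         indent + line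
--         for line in lines[1:])
--     return '\n'.join(res_lines)
-- ===== SOURCE B (Python) =====
-- def _glue_prefix_box(
--         prefix:
--             str,
--         box:
--             str,
--         indent_width:
--             int |
--             None=None
--         ) -> str:
--     """Concatenate strings with proper indentation."""
--     if indent_width is None:
--         indent_width = len(prefix.split('\n')[-1])
--     indent = indent_width * '\x20'
--     out = [prefix]
--     for ch in box:
--         out.append(ch)
--         if ch == '\n':
--             out.append(indent)
--     return ''.join(out)
-- ===== Notes on version B (the rewrite author's own statement) =====
-- stated objective: alternative
-- what changed: Replaces A's line-level pipeline (split box into lines, special-case the first line, generator over the tail, join) by a single character-level streaming scan that copies each character and emits the indent right after every newline; no line list is ever built.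
import Mathlib
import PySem

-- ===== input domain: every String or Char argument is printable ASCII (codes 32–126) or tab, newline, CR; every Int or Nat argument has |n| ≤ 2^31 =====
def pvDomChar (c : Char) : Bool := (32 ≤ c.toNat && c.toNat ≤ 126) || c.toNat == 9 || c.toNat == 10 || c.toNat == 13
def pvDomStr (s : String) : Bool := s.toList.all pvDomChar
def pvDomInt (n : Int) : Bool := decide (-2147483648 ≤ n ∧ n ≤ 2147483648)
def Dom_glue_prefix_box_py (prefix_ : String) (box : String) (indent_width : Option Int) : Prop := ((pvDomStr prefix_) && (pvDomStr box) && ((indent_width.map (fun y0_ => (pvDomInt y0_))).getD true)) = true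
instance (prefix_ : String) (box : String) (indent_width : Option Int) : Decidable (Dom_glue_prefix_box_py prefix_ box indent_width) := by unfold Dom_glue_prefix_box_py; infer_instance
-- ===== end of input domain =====

-- B replaces A's split-lines / first-line special case / generator / join pipeline by a
-- single character-level streaming scan emitting the indent after each newline (objective: alternative).


-- ===== PORT A =====
-- lines = box.split('\n'); indent_width from last prefix line if None; indent = w*' ';
-- res_lines = [prefix+lines[0]] ++ [indent+line for line in lines[1:]]; '\n'.join(res_lines)
def glue_prefix_box_py (prefix_ : String) (box : String) (indent_width : Option Int) : String :=
  let lines : List (List Char) := PySem.Chars.splitOn box.toList ['\n']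
  let w : Int :=
    match indent_width with
    | none =>
        let prefix_lines := PySem.Chars.splitOn prefix_.toList ['\n']
        ((prefix_lines.getLastD []).length : Int)  -- prefix_lines[-1]: split never returns [], so [-1] = last
    | some w => w
  let indent : List Char := List.replicate w.toNat ' '  -- n * ' ': empty for n ≤ 0, exactly Python
  let res_lines : List (List Char) :=
    (prefix_.toList ++ lines.headD []) ::          -- lines[0]: split never returns [], so [0] = head
      (lines.drop 1).map (fun line => indent ++ line)
  String.ofList (PySem.Chars.join ['\n'] res_lines)

-- ===== PORT B =====
-- if indent_width is None: indent_width = len(prefix.split('\n')[-1]); indent = w*' ';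
-- out = [prefix]; for ch in box: out.append(ch); if ch=='\n': out.append(indent); return ''.join(out)
def glue_prefix_box_py_alt (prefix_ : String) (box : String) (indent_width : Option Int) : String :=
  let w : Int :=
    match indent_width with
    | none => (((PySem.Chars.splitOn prefix_.toList ['\n']).getLastD []).length : Int)
    | some w => w
  let indent : List Char := List.replicate w.toNat ' '
  let out : List Char :=
    box.toList.foldl
      (fun acc ch => (acc ++ [ch]) ++ (if ch = '\n' then indent else []))
      prefix_.toList
  String.ofList out

-- ===== PRECONDITION & SPEC =====
def Spec_glue_prefix_box_py (prefix_ : String) (box : String) (indent_width : Option Int) (out : String) : Prop := out = glue_prefix_box_py_alt prefix_ box indent_width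
instance (prefix_ : String) (box : String) (indent_width : Option Int) (out : String) : Decidable (Spec_glue_prefix_box_py prefix_ box indent_width out) := by unfold Spec_glue_prefix_box_py; infer_instance

-- ===== CLAIM (what is proved, stated in full; the proofs are below) =====
def Claim_equal_glue_prefix_box_py : Prop := ∀ (prefix_ : String) (box : String) (indent_width : Option Int), Dom_glue_prefix_box_py prefix_ box indent_width → Spec_glue_prefix_box_py prefix_ box indent_width (glue_prefix_box_py prefix_ box indent_width)

-- ===== LEMMAS AND PROOFS =====

-- reference single-char split, used only in the proofs
def mySplit : List Char → List (List Char)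
  | [] => [[]]
  | c :: t =>
      if c = '\n' then [] :: mySplit t
      else match mySplit t with
        | [] => [[c]]          -- unreachable
        | h :: r => (c :: h) :: r

theorem mySplit_ne_nil (l : List Char) : mySplit l ≠ [] := by
  cases l with
  | nil => simp [mySplit]
  | cons c t =>
      simp only [mySplit]
      split
      · simp
      · split <;> simp

theorem splitOn_go_eq (fuel : Nat) :
    ∀ (l cur : List Char) (acc : List (List Char)), l.length ≤ fuel →
      PySem.Chars.splitOn.go ['\n'] fuel l cur acc =
        acc.reverse ++ (match mySplit l with
          | [] => [cur.reverse]
          | h :: r => (cur.reverse ++ h) :: r) := by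
  induction fuel with
  | zero =>
      intro l cur acc hl
      have : l = [] := by cases l <;> simp_all
      subst this
      simp [PySem.Chars.splitOn.go, mySplit]
  | succ n ih =>
      intro l cur acc hl
      cases l with
      | nil => simp [PySem.Chars.splitOn.go, mySplit]
      | cons c t =>
          by_cases hc : c = '\n'
          · subst hc
            have hpre : List.isPrefixOf ['\n'] ('\n' :: t) = true := by simp [List.isPrefixOf]
            simp only [PySem.Chars.splitOn.go, hpre, if_pos]
            rw [ih _ _ _ (by simpa using Nat.le_of_succ_le_succ hl)]
            rcases hms : mySplit t with _ | ⟨h, r⟩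
            · exact absurd hms (mySplit_ne_nil t)
            · simp [mySplit, hms]
          · have hpre : List.isPrefixOf ['\n'] (c :: t) = false := by
              simp [List.isPrefixOf]; exact fun h => absurd h.symm hc
            simp only [PySem.Chars.splitOn.go, hpre]
            rw [ih t (c :: cur) acc (by simpa using Nat.le_of_succ_le_succ hl)]
            simp only [mySplit, if_neg hc]
            rcases hms : mySplit t with _ | ⟨h, r⟩
            · exact absurd hms (mySplit_ne_nil t)
            · simp

theorem splitOn_eq (l : List Char) : PySem.Chars.splitOn l ['\n'] = mySplit l := by
  unfold PySem.Chars.splitOn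
  rw [splitOn_go_eq (l.length + 1) l [] [] (by omega)]
  rcases hms : mySplit l with _ | ⟨h, r⟩
  · exact absurd hms (mySplit_ne_nil l)
  · simp

theorem foldl_emit_eq (ind : List Char) :
    ∀ (l init : List Char),
      l.foldl (fun acc ch => (acc ++ [ch]) ++ (if ch = '\n' then ind else [])) init =
        init ++ l.flatMap (fun c => if c = '\n' then '\n' :: ind else [c]) := by
  intro l
  induction l with
  | nil => simp
  | cons c t ih =>
      intro init
      rw [List.foldl_cons, ih]
      by_cases hc : c = '\n' <;> simp [hc, List.append_assoc]

theorem join_cons (h : List Char) (t : List (List Char)) :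
    PySem.Chars.join ['\n'] (h :: t) = h ++ t.flatMap (fun x => '\n' :: x) := by
  induction t generalizing h with
  | nil => simp [PySem.Chars.join_singleton]
  | cons q r ih => simp [PySem.Chars.join_cons_cons, ih]

theorem glue_main (ind : List Char) (l : List Char) :
    (mySplit l).headD [] ++ ((mySplit l).drop 1).flatMap (fun line => '\n' :: (ind ++ line)) =
      l.flatMap (fun c => if c = '\n' then '\n' :: ind else [c]) := by
  induction l with
  | nil => simp [mySplit]
  | cons c t ih =>
      by_cases hc : c = '\n'
      · subst hc
        simp only [mySplit, if_pos]
        rcases hms : mySplit t with _ | ⟨h, r⟩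
        · exact absurd hms (mySplit_ne_nil t)
        · rw [hms] at ih; simpa using ih
      · simp only [mySplit, if_neg hc]
        rcases hms : mySplit t with _ | ⟨h, r⟩
        · exact absurd hms (mySplit_ne_nil t)
        · rw [hms] at ih
          simp only [List.headD_cons, List.drop_one, List.tail_cons] at ih ⊢
          simp [hc, ← ih]

theorem glue_main' (ind pcs l : List Char) :
    PySem.Chars.join ['\n']
        ((pcs ++ (mySplit l).headD []) :: ((mySplit l).drop 1).map (fun line => ind ++ line)) =
      pcs ++ l.flatMap (fun c => if c = '\n' then '\n' :: ind else [c]) := by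
  rw [join_cons, List.append_assoc]
  congr 1
  rw [← glue_main ind l]
  rw [List.flatMap_map]

-- ===== VERDICT (by name: the statement is the Claim_ definition above) =====
theorem glue_prefix_box_py_spec : Claim_equal_glue_prefix_box_py := by
  intro prefix_ box indent_width _
  unfold Spec_glue_prefix_box_py glue_prefix_box_py glue_prefix_box_py_alt
  simp only [splitOn_eq, foldl_emit_eq]
  exact congrArg String.ofList (glue_main' _ _ _)
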